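-- pv_equiv track=rewrite | github.com/alexro/pypypy | code_forces/1355B.py | solve
-- ===== SOURCE A (Python) =====
-- def solve(a):
--     a.sort()
--     al = len(a)
--
--     count = 0
--     g = 0
--
--     for k in range(al):
--         e = a[k]
--         if e <= g + 1:
--             count += 1
--             g = 0
--         else:
--             g += 1
--
--     return count
-- ===== SOURCE B (Python) =====
-- # Alternative algorithm: count multiplicities once, then process each distinct value
-- # in bulk with div/mod arithmetic instead of scanning every element of the sorted list.
-- # Equivalence is about the return value: A sorts its argument in place, B does not mutate it.
-- def solve(a):
--     counts = {}
--     for e in a: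
--         counts[e] = counts.get(e, 0) + 1
--     total = 0
--     g = 0
--     for v in sorted(counts):
--         m = counts[v]
--         if v <= 1:
--             total += m
--             g = 0
--         else:
--             total += (g + m) // v
--             g = (g + m) % v
--     return total
-- ===== Notes on version B (the rewrite author's own statement) =====
-- stated objective: alternative
-- what changed: A sorts the whole list and runs the greedy scan element by element; B builds a value->multiplicity dictionary in one pass, sorts only the distinct values, and processes each run of equal values in O(1) with floor-division/modulo arithmetic instead of per-element steps.
import Mathlib
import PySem

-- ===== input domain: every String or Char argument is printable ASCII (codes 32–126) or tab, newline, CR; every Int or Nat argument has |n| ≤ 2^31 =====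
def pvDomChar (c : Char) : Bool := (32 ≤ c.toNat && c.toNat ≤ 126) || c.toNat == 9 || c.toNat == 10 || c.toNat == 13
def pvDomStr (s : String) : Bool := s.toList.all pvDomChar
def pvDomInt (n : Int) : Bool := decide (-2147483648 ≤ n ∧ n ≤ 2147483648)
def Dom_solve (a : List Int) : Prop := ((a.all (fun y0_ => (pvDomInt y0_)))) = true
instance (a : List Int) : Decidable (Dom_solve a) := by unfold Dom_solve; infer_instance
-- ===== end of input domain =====

-- B replaces A's per-element greedy scan over the full sorted list by a counter plus
-- bulk div/mod arithmetic per distinct value (a different algorithm, similar cost;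
-- A also sorts its argument in place — the equivalence proved is about the return value only).


-- ===== PORT A =====
-- one step of A's loop body: state is (count, g)
def solveStep (cg : Int × Int) (e : Int) : Int × Int :=
  if e ≤ cg.2 + 1 then (cg.1 + 1, 0) else (cg.1, cg.2 + 1)

def solve (a : List Int) : Int :=
  -- a.sort(); for k in range(len(a)): e = a[k]; …
  let s := PySem.List.sorted a (fun x => x) false
  ((PySem.List.pyRange 0 (s.length : Int) 1).foldl
    (fun cg k => solveStep cg (PySem.List.pyGetD s k 0)) ((0 : Int), (0 : Int))).1

-- ===== PORT B =====
-- one step of B's loop body: state is (total, g); m is counts[v]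
def solveAltStep (tg : Int × Int) (v m : Int) : Int × Int :=
  if v ≤ 1 then (tg.1 + m, 0)
  else (tg.1 + PySem.Int.floordiv (tg.2 + m) v, PySem.Int.mod (tg.2 + m) v)

def solve_alt (a : List Int) : Int :=
  let counts := a.foldl (fun (d : PySem.Dict Int Int) e => d.insert e (d.getD e 0 + 1)) PySem.Dict.empty
  -- counts[v]: v ranges over counts' own keys, so the lookup never raises; ported as getD 0
  ((PySem.List.sorted counts.keys (fun x => x) false).foldl
    (fun tg v => solveAltStep tg v (counts.getD v 0)) ((0 : Int), (0 : Int))).1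

-- ===== PRECONDITION & SPEC =====
def Spec_solve (a : List Int) (out : Int) : Prop := out = solve_alt a
instance (a : List Int) (out : Int) : Decidable (Spec_solve a out) := by unfold Spec_solve; infer_instance

-- ===== CLAIM (what is proved, stated in full; the proofs are below) =====
def Claim_equal_solve : Prop := ∀ (a : List Int), Dom_solve a → Spec_solve a (solve a)

-- ===== LEMMAS AND PROOFS =====

-- counting in a flatMap of runs over distinct values
lemma count_flatMap_replicate (x : Int) (ks : List Int) (cnt : Int → Nat) (hnd : ks.Nodup) :
    (ks.flatMap (fun v => List.replicate (cnt v) v)).count x =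
      if x ∈ ks then cnt x else 0 := by
  induction ks with
  | nil => simp
  | cons v t ih =>
    rw [List.flatMap_cons, List.count_append, ih hnd.of_cons, List.count_replicate]
    by_cases hxv : x = v
    · subst hxv
      have hxt : x ∉ t := (List.nodup_cons.mp hnd).1
      simp [hxt]
    · by_cases hxt : x ∈ t <;> simp [hxv, hxt, Ne.symm hxv]

-- a flatMap of runs over a strictly increasing key list is weakly increasing
lemma pairwise_le_flatMap_replicate (ks : List Int) (cnt : Int → Nat)
    (hpw : ks.Pairwise (· < ·)) :
    (ks.flatMap (fun v => List.replicate (cnt v) v)).Pairwise (· ≤ ·) := by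
  induction ks with
  | nil => simp
  | cons v t ih =>
    rw [List.flatMap_cons, List.pairwise_append]
    refine ⟨List.pairwise_replicate.mpr (Or.inr le_rfl), ih hpw.of_cons, ?_⟩
    intro x hx y hy
    rw [List.eq_of_mem_replicate hx]
    rw [List.mem_flatMap] at hy
    obtain ⟨w, hw, hyw⟩ := hy
    rw [List.eq_of_mem_replicate hyw]
    exact le_of_lt (List.rel_of_pairwise_cons hpw hw)

-- A's fold over a run of m copies of v, v ≤ 1: every element forms a team
lemma foldA_replicate_le_one (v : Int) (hv : v ≤ 1) (c g : Int) (hg : 0 ≤ g) :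
    ∀ m : Nat, 1 ≤ m →
      (List.replicate m v).foldl solveStep (c, g) = (c + m, 0) := by
  intro m
  induction m generalizing c g with
  | zero => omega
  | succ k ih =>
    intro _
    rw [List.replicate_succ, List.foldl_cons]
    have hstep : solveStep (c, g) v = (c + 1, 0) := by
      simp only [solveStep]
      rw [if_pos (by omega)]
    rw [hstep]
    rcases Nat.eq_zero_or_pos k with hk | hk
    · subst hk; simp
    · rw [ih (c + 1) 0 le_rfl hk]
      push_cast
      ring_nf

-- A's fold over a run of m copies of v, 2 ≤ v: bulk div/mod
lemma foldA_replicate_ge_two (v : Int) (hv : 2 ≤ v) :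
    ∀ (m : Nat) (c g : Int), 0 ≤ g → g < v →
      (List.replicate m v).foldl solveStep (c, g) =
        (c + PySem.Int.floordiv (g + m) v, PySem.Int.mod (g + m) v) := by
  intro m
  induction m with
  | zero =>
    intro c g hg hlt
    rw [List.replicate_zero, List.foldl_nil,
      PySem.Int.floordiv_eq_ediv_of_pos (by omega), PySem.Int.mod_eq_emod_of_pos (by omega)]
    rw [show g + (0 : Nat) = g by push_cast; ring,
      Int.ediv_eq_zero_of_lt hg hlt, Int.emod_eq_of_lt hg hlt]
    simp
  | succ k ih =>
    intro c g hg hlt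
    rw [List.replicate_succ, List.foldl_cons]
    by_cases hcond : v ≤ g + 1
    · have hstep : solveStep (c, g) v = (c + 1, 0) := by
        simp only [solveStep]; rw [if_pos (by omega)]
      rw [hstep, ih (c + 1) 0 le_rfl (by omega)]
      have hgv : g = v - 1 := by omega
      have h1 : g + ((k : Int) + 1) = (k : Int) + 1 * v := by omega
      rw [PySem.Int.floordiv_eq_ediv_of_pos (by omega), PySem.Int.floordiv_eq_ediv_of_pos (by omega),
        PySem.Int.mod_eq_emod_of_pos (by omega), PySem.Int.mod_eq_emod_of_pos (by omega)]
      push_cast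
      rw [h1, Int.add_mul_ediv_right _ _ (by omega : v ≠ 0), Int.add_mul_emod_self_right]
      simp only [zero_add, Prod.mk.injEq]
      exact ⟨by ring, trivial⟩
    · have hstep : solveStep (c, g) v = (c, g + 1) := by
        simp only [solveStep]; rw [if_neg hcond]
      rw [hstep, ih c (g + 1) (by omega) (by omega)]
      norm_num
      constructor <;> · congr 1; ring

-- the run decomposition: sorted a is the concatenation of its runs, one per distinct value
lemma sorted_eq_flatMap (a : List Int) :
    PySem.List.sorted a (fun x => x) false =
      (PySem.List.sorted (PySem.Set.ofList a) (fun x => x) false).flatMap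
        (fun v => List.replicate (a.count v) v) := by
  apply PySem.List.sorted_id_eq_of_perm_of_pairwise
  · rw [List.perm_iff_count]
    intro x
    have hnd : (PySem.List.sorted (PySem.Set.ofList a) (fun x => x) false).Pairwise (· < ·) :=
      PySem.List.sorted_ofList_pairwise_lt a
    have hmem : ∀ y, y ∈ PySem.List.sorted (PySem.Set.ofList a) (fun x => x) false ↔ y ∈ a := by
      intro y
      rw [PySem.List.mem_sorted]
      exact PySem.Set.mem_ofList _ _
    rw [count_flatMap_replicate _ _ _ (hnd.imp (fun h => ne_of_lt h))]
    by_cases hx : x ∈ a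
    · rw [if_pos ((hmem x).mpr hx)]
    · rw [if_neg (fun h => hx ((hmem x).mp h)), List.count_eq_zero.mpr hx]
  · exact pairwise_le_flatMap_replicate _ _ (PySem.List.sorted_ofList_pairwise_lt a)

-- main loop correspondence over a strictly increasing key list
lemma fold_runs (a : List Int) :
    ∀ (ks : List Int), ks.Pairwise (· < ·) → (∀ v ∈ ks, 1 ≤ a.count v) →
    ∀ (c g : Int), 0 ≤ g → (∀ v ∈ ks, 2 ≤ v → g < v) →
      (ks.flatMap (fun v => List.replicate (a.count v) v)).foldl solveStep (c, g) =
        ks.foldl (fun tg v => solveAltStep tg v (a.count v)) (c, g) := by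
  intro ks
  induction ks with
  | nil => intros; rfl
  | cons v t ih =>
    intro hpw hcnt c g hg hlt
    rw [List.flatMap_cons, List.foldl_append, List.foldl_cons]
    have hcv : 1 ≤ a.count v := hcnt v (List.mem_cons_self)
    by_cases hv : v ≤ 1
    · rw [foldA_replicate_le_one v hv c g hg _ hcv]
      have : solveAltStep (c, g) v (a.count v) = (c + (a.count v : Int), 0) := by
        simp only [solveAltStep]; rw [if_pos hv]
      rw [this]
      exact ih hpw.of_cons (fun w hw => hcnt w (List.mem_cons_of_mem _ hw)) _ 0 le_rfl
        (fun w hw h2 => by omega)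
    · have h2v : 2 ≤ v := by omega
      have hgv : g < v := hlt v (List.mem_cons_self) h2v
      rw [foldA_replicate_ge_two v h2v _ c g hg hgv]
      have : solveAltStep (c, g) v (a.count v) =
          (c + PySem.Int.floordiv (g + (a.count v : Int)) v, PySem.Int.mod (g + (a.count v : Int)) v) := by
        simp only [solveAltStep]; rw [if_neg hv]
      rw [this]
      refine ih hpw.of_cons (fun w hw => hcnt w (List.mem_cons_of_mem _ hw)) _ _
        (PySem.Int.mod_nonneg _ (by omega)) (fun w hw _ => ?_)
      have := PySem.Int.mod_lt (g + (a.count v : Int)) (b := v) (by omega)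
      have := List.rel_of_pairwise_cons hpw hw
      omega

-- ===== VERDICT (by name: the statement is the Claim_ definition above) =====
theorem solve_spec : Claim_equal_solve := by
  intro a _
  unfold Spec_solve solve solve_alt
  simp only []
  rw [PySem.List.foldl_pyRange_zero_pyGetD' _ 0 solveStep ((0 : Int), (0 : Int))]
  rw [PySem.Dict.keys_foldl_insert,
    show (PySem.Dict.empty : PySem.Dict Int Int).keys = [] from rfl, PySem.Set.update_nil_left]
  have hgetD : ∀ v : Int,
      (a.foldl (fun (d : PySem.Dict Int Int) e => d.insert e (d.getD e 0 + 1)) PySem.Dict.empty).getD v 0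
        = (a.count v : Int) := by
    intro v
    rw [PySem.Dict.getD_foldl_insert_add_one,
      show (PySem.Dict.empty : PySem.Dict Int Int).getD v 0 = 0 from rfl, zero_add]
  have hfun : ∀ (tg : Int × Int) (v : Int),
      solveAltStep tg v ((a.foldl (fun (d : PySem.Dict Int Int) e => d.insert e (d.getD e 0 + 1)) PySem.Dict.empty).getD v 0)
        = solveAltStep tg v (a.count v) := by
    intro tg v; rw [hgetD v]
  rw [PySem.List.foldl_congr_mem _ _ (fun tg v => solveAltStep tg v (a.count v)) _
    (fun tg v _ => hfun tg v)]
  rw [sorted_eq_flatMap a]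
  rw [fold_runs a _ (PySem.List.sorted_ofList_pairwise_lt a)
    (fun v hv => List.count_pos_iff.mpr ((PySem.Set.mem_ofList _ _).mp ((PySem.List.mem_sorted ..).mp hv)))
    0 0 le_rfl (fun v _ _ => by omega)]
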